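-- pv_equiv track=rewrite | github.com/YatongXing/uci-CS121-A3 | search_index.py | boolean_and_candidates
-- ===== SOURCE A (Python) =====
-- def boolean_and_candidates(query_terms, term_docs):
--     """
--     Returns the intersection of document sets for all query terms (AND query).
--     Used as a fallback filter if phrase search yields too few results.
--     """
--     posting_sets = []
--     for t in query_terms:
--         s = term_docs.get(t)
--         if not s:
--             return set()  # One term missing implies intersection is empty
--         posting_sets.append(s)
--
--     # Start with first set and intersect with others
--     docs = posting_sets[0]
--     for s in posting_sets[1:]:
--         docs = docs & s
--         if not docs:
--             break
--     return docs
-- ===== SOURCE B (Python) =====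
-- def boolean_and_candidates(query_terms, term_docs):
--     posting_sets = []
--     for t in query_terms:
--         s = term_docs.get(t)
--         if not s:
--             return set()  # One term missing implies intersection is empty
--         posting_sets.append(s)
--
--     # Count, over all posting sets, how many sets each document appears in;
--     # a document is in the intersection iff it appears in all of them.
--     counts = {}
--     for d in posting_sets[0]:
--         counts[d] = counts.get(d, 0) + 1
--     for s in posting_sets[1:]:
--         for d in s:
--             counts[d] = counts.get(d, 0) + 1
--     n = len(posting_sets)
--     return {d for d, c in counts.items() if c == n}
-- ===== Notes on version B (the rewrite author's own statement) =====
-- stated objective: alternative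
-- what changed: The pairwise set-intersection loop is replaced by a single occurrence-counting pass over all posting sets (a dict counting in how many sets each doc occurs; docs counted len(posting_sets) times form the intersection); the guard loop is kept.
import Mathlib
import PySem

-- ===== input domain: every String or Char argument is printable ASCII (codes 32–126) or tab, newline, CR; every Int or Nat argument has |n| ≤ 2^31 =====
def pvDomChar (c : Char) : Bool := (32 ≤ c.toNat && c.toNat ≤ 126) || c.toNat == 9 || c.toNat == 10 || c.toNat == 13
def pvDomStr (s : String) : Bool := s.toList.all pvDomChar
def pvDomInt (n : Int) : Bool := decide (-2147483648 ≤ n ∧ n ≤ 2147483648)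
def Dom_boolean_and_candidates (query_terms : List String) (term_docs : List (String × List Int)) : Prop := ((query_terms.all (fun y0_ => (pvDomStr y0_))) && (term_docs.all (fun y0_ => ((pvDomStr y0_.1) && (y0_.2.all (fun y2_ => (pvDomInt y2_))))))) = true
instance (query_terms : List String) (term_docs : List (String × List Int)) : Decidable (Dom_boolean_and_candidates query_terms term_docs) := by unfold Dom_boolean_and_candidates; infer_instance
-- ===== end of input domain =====

-- B replaces the pairwise set-intersection loop by one counting pass (dict: doc → in how many
-- posting sets it occurs); same guard loop, same result. Objective: alternative decomposition.

-- ===== PORT A =====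
-- guard loop shared by both Pythons verbatim: collect term_docs.get(t) for each term,
-- 'none' = the early 'return set()' (term missing or empty posting set)
def bacCollect : List String → List (String × List Int) → List (List Int) → Option (List (List Int))
  | [], _, acc => some acc
  | t :: ts, d, acc =>
    match (PySem.Dict.mk d).get? t with
    | none => none
    | some s => if s = [] then none else bacCollect ts d (acc ++ [s])

-- 'for s in posting_sets[1:]: docs = docs & s; if not docs: break'
def bacInter : List Int → List (List Int) → List Int
  | docs, [] => docs
  | docs, s :: rest =>
    let d := PySem.Set.inter docs s
    if d = [] then d else bacInter d rest

def boolean_and_candidates (query_terms : List String) (term_docs : List (String × List Int)) : List Int :=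
  match bacCollect query_terms term_docs [] with
  | none => PySem.Set.empty
  | some ps =>
    -- posting_sets[0]; .getD [] only makes the lookup total (Pre_ gives query_terms ≠ [], so ps ≠ [])
    let docs := (PySem.List.pyGet? ps 0).getD []
    bacInter docs (ps.drop 1)  -- posting_sets[1:] with nonneg start = drop 1, exact

-- ===== PORT B =====
def boolean_and_candidates_alt (query_terms : List String) (term_docs : List (String × List Int)) : List Int :=
  match bacCollect query_terms term_docs [] with
  | none => PySem.Set.empty
  | some ps =>
    let first := (PySem.List.pyGet? ps 0).getD []
    -- counts[d] = counts.get(d, 0) + 1 over posting_sets[0], then over each s in posting_sets[1:]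
    let counts0 := first.foldl (fun d x => d.insert x (d.getD x 0 + 1)) (PySem.Dict.empty : PySem.Dict Int Int)
    let counts := (ps.drop 1).foldl (fun c s => s.foldl (fun d x => d.insert x (d.getD x 0 + 1)) c) counts0
    let n : Int := (ps.length : Int)
    PySem.Set.ofList ((counts.items.filter (fun p => p.2 == n)).map (·.1))

-- ===== PRECONDITION & SPEC =====
-- Pre_ excludes the empty query (A raises IndexError at posting_sets[0]) and requires each
-- term_docs value to be duplicate-free, the List encoding of the Python set the dict holds.
def Pre_boolean_and_candidates (query_terms : List String) (term_docs : List (String × List Int)) : Prop :=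
  query_terms ≠ [] ∧ ∀ p ∈ term_docs, p.2.Nodup
instance (query_terms : List String) (term_docs : List (String × List Int)) : Decidable (Pre_boolean_and_candidates query_terms term_docs) := by unfold Pre_boolean_and_candidates; infer_instance
def pvWitness_boolean_and_candidates : List String × (List (String × List Int)) :=
  (["a", "b"], [("a", [1, 2, 3]), ("b", [2, 3])])
def Spec_boolean_and_candidates (query_terms : List String) (term_docs : List (String × List Int)) (out : List Int) : Prop := out = boolean_and_candidates_alt query_terms term_docs
instance (query_terms : List String) (term_docs : List (String × List Int)) (out : List Int) : Decidable (Spec_boolean_and_candidates query_terms term_docs out) := by unfold Spec_boolean_and_candidates; infer_instance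

-- ===== CLAIM (what is proved, stated in full; the proofs are below) =====
def Claim_equal_boolean_and_candidates : Prop := ∀ (query_terms : List String) (term_docs : List (String × List Int)), Dom_boolean_and_candidates query_terms term_docs → Pre_boolean_and_candidates query_terms term_docs → Spec_boolean_and_candidates query_terms term_docs (boolean_and_candidates query_terms term_docs)

-- ===== LEMMAS AND PROOFS =====

theorem bacInter_eq_filter (docs : List Int) (rest : List (List Int)) :
    bacInter docs rest = docs.filter (fun x => rest.all (fun s => PySem.Set.contains s x)) := by
  induction rest generalizing docs with
  | nil => simp [bacInter]
  | cons s rest ih =>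
    have key : bacInter docs (s :: rest) =
        (PySem.Set.inter docs s).filter (fun x => rest.all (fun t => PySem.Set.contains t x)) := by
      by_cases h : PySem.Set.inter docs s = []
      · simp [bacInter, h]
      · simp only [bacInter, if_neg h]
        exact ih _
    rw [key]
    show (docs.filter _).filter _ = _
    rw [List.filter_filter]
    simp [List.all_cons, Bool.and_comm]

theorem collect_spec : ∀ (qs : List String) (d : List (String × List Int)) (acc ps : List (List Int)),
    bacCollect qs d acc = some ps →
    ps.length = acc.length + qs.length ∧ ∀ s ∈ ps, s ∈ acc ∨ s ∈ d.map (·.2) := by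
  intro qs
  induction qs with
  | nil =>
    intro d acc ps h
    simp [bacCollect] at h
    subst h
    exact ⟨by simp, fun s hs => Or.inl hs⟩
  | cons t ts ih =>
    intro d acc ps h
    simp only [bacCollect] at h
    cases hg : (PySem.Dict.mk d).get? t with
    | none => rw [hg] at h; exact absurd h (by simp)
    | some s =>
      rw [hg] at h
      simp only at h
      by_cases hs : s = []
      · rw [if_pos hs] at h; exact absurd h (by simp)
      · rw [if_neg hs] at h
        obtain ⟨hlen, hmem⟩ := ih d (acc ++ [s]) ps h
        have hsmem : s ∈ d.map (·.2) := by
          clear h hlen hmem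
          induction d with
          | nil => simp [PySem.Dict.get?] at hg
          | cons p rest ihd =>
            rw [PySem.Dict.get?_mk_cons] at hg
            by_cases he : (p.1 == t) = true
            · rw [if_pos he] at hg
              simp at hg
              simp [← hg]
            · rw [if_neg he] at hg
              simpa using Or.inr (by simpa using ihd hg)
        constructor
        · simp [List.length_append] at hlen ⊢; omega
        · intro u hu
          rcases hmem u hu with h' | h'
          · rcases List.mem_append.mp h' with h'' | h''
            · exact Or.inl h''
            · simp at h''; subst h''; exact Or.inr hsmem
          · exact Or.inr h'

theorem counts_getD (rest : List (List Int)) (c0 : PySem.Dict Int Int) (x : Int) :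
    ((rest.foldl (fun c s => s.foldl (fun d y => d.insert y (d.getD y 0 + 1)) c) c0).getD x 0)
      = c0.getD x 0 + (rest.map (fun s => (s.count x : Int))).sum := by
  induction rest generalizing c0 with
  | nil => simp
  | cons s rest ih =>
    rw [List.foldl_cons, ih, PySem.Dict.getD_foldl_insert_add_one]
    simp [add_assoc]

theorem counts_keys (rest : List (List Int)) (c0 : PySem.Dict Int Int) :
    ((rest.foldl (fun c s => s.foldl (fun d y => d.insert y (d.getD y 0 + 1)) c) c0).keys)
      = PySem.Set.update c0.keys rest.flatten := by
  induction rest generalizing c0 with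
  | nil => simp [PySem.Set.update]
  | cons s rest ih =>
    rw [List.foldl_cons, ih, PySem.Dict.keys_foldl_insert, List.flatten_cons,
      PySem.Set.update_append]

theorem sum_counts_le (rest : List (List Int)) (hnd : ∀ s ∈ rest, s.Nodup) (x : Int) :
    (rest.map (fun s => (s.count x : Int))).sum ≤ (rest.length : Int) := by
  induction rest with
  | nil => simp
  | cons s rest ih =>
    have h1 : s.count x ≤ 1 := List.nodup_iff_count_le_one.mp (hnd s (by simp)) x
    have h2 := ih (fun t ht => hnd t (by simp [ht]))
    simp only [List.map_cons, List.sum_cons, List.length_cons]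
    push_cast
    omega

theorem sum_counts_eq_iff (rest : List (List Int)) (hnd : ∀ s ∈ rest, s.Nodup) (x : Int) :
    ((rest.map (fun s => (s.count x : Int))).sum = (rest.length : Int)) ↔ ∀ s ∈ rest, x ∈ s := by
  induction rest with
  | nil => simp
  | cons s rest ih =>
    have h1 : s.count x ≤ 1 := List.nodup_iff_count_le_one.mp (hnd s (by simp)) x
    have h2 := sum_counts_le rest (fun t ht => hnd t (by simp [ht])) x
    have ih' := ih (fun t ht => hnd t (by simp [ht]))
    simp only [List.map_cons, List.sum_cons, List.length_cons, List.mem_cons]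
    constructor
    · intro h
      have hc : (s.count x : Int) = 1 ∧ (rest.map (fun s => (s.count x : Int))).sum = (rest.length : Int) := by
        push_cast at h ⊢; omega
      have hx : x ∈ s := by
        by_contra hxs
        rw [List.count_eq_zero_of_not_mem hxs] at hc
        simp at hc
      exact fun t ht => ht.elim (fun e => e ▸ hx) (ih'.mp hc.2 t)
    · intro h
      have hx : s.count x = 1 := by
        have := List.count_pos_iff.mpr (h s (Or.inl rfl))
        omega
      have := ih'.mpr (fun t ht => h t (Or.inr ht))
      push_cast
      omega

theorem boolean_and_candidates_spec : Claim_equal_boolean_and_candidates := by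
  intro qs td _hdom hpre
  obtain ⟨hqs, hnodup⟩ := hpre
  unfold Spec_boolean_and_candidates boolean_and_candidates boolean_and_candidates_alt
  cases hc : bacCollect qs td [] with
  | none => rfl
  | some ps =>
    obtain ⟨hlen, hmem⟩ := collect_spec qs td [] ps hc
    simp only [List.length_nil, Nat.zero_add] at hlen
    have hpsnodup : ∀ s ∈ ps, s.Nodup := by
      intro s hs
      rcases hmem s hs with h | h
      · simp at h
      · obtain ⟨p, hp, hps⟩ := List.mem_map.mp h
        exact hps ▸ hnodup p hp
    cases ps with
    | nil =>
      exfalso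
      exact hqs (List.length_eq_zero_iff.mp hlen.symm)
    | cons first rest =>
      have hfirst : (PySem.List.pyGet? (first :: rest) 0).getD [] = first := by
        simp [PySem.List.pyGet?, PySem.List.pyIdx?]
      simp only [hfirst, List.drop_succ_cons, List.drop_zero]
      have hfnd : first.Nodup := hpsnodup first (by simp)
      have hrnd : ∀ s ∈ rest, s.Nodup := fun s hs => hpsnodup s (by simp [hs])
      -- counter over first
      set step := fun (d : PySem.Dict Int Int) (x : Int) => d.insert x (d.getD x 0 + 1) with hstep
      have hc0 : first.foldl step PySem.Dict.empty = PySem.Dict.counter first :=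
        PySem.Dict.foldl_insert_getD_add_one_eq_counter first
      set counts := rest.foldl (fun c s => s.foldl step c) (first.foldl step PySem.Dict.empty) with hcounts
      have hkeys : counts.keys = PySem.Set.update first rest.flatten := by
        rw [hcounts, hc0, counts_keys, PySem.Dict.keys_counter,
          PySem.Set.ofList_eq_self_of_nodup first hfnd]
      have hknd : counts.keys.Nodup := by
        rw [hkeys]; exact PySem.Set.nodup_update first rest.flatten hfnd
      have hgetD : ∀ x, counts.getD x 0 = (first.count x : Int) + (rest.map (fun s => (s.count x : Int))).sum := by
        intro x
        rw [hcounts, hc0, counts_getD, PySem.Dict.getD_counter]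
      have hitems : counts.items = counts.keys.map (fun k => (k, counts.getD k 0)) :=
        PySem.Dict.items_eq_map_keys counts hknd 0
      set n : Int := ((first :: rest).length : Int) with hn
      have hnval : n = (rest.length : Int) + 1 := by simp [hn]
      -- simplify B's expression
      have hmapfilter :
          ((counts.items.filter (fun p => p.2 == n)).map (·.1))
            = counts.keys.filter (fun k => counts.getD k 0 == n) := by
        rw [hitems, List.filter_map, List.map_map]
        simp [Function.comp_def]
      rw [hmapfilter, hkeys, PySem.Set.update_eq_append_filter, List.filter_append]
      -- the appended (new) keys never reach count n
      have hextra : (List.filter (fun y => !PySem.Set.contains first y) (PySem.Set.ofList rest.flatten)).filter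
          (fun k => counts.getD k 0 == n) = [] := by
        rw [List.filter_eq_nil_iff]
        intro x hx
        have hxf : x ∉ first := by
          have := (List.mem_filter.mp hx).2
          simpa [PySem.Set.contains_iff] using this
        have hcount0 : first.count x = 0 := List.count_eq_zero_of_not_mem hxf
        have hle := sum_counts_le rest hrnd x
        simp only [hgetD, hcount0, Nat.cast_zero, zero_add, beq_iff_eq]
        omega
      rw [hextra, List.append_nil]
      -- on first's elements, count = n iff the doc is in every other set
      have hfilter : first.filter (fun k => counts.getD k 0 == n)
          = first.filter (fun x => rest.all (fun s => PySem.Set.contains s x)) := by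
        apply List.filter_congr
        intro x hx
        have hc1 : first.count x = 1 := by
          have := List.count_pos_iff.mpr hx
          have := List.nodup_iff_count_le_one.mp hfnd x
          omega
        rw [Bool.eq_iff_iff]
        simp only [hgetD, hc1, Nat.cast_one, beq_iff_eq, List.all_eq_true, hnval]
        constructor
        · intro h s hs
          exact (PySem.Set.contains_iff _ _).mpr ((sum_counts_eq_iff rest hrnd x).mp (by omega) s hs)
        · intro h
          have := (sum_counts_eq_iff rest hrnd x).mpr
            (fun s hs => (PySem.Set.contains_iff _ _).mp (h s hs))
          omega
      rw [hfilter, bacInter_eq_filter,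
        PySem.Set.ofList_eq_self_of_nodup _ (List.Nodup.filter _ hfnd)]

-- ===== VERDICT (by name: the statement is the Claim_ definition above) =====
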